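-- pv_equiv track=rewrite | github.com/Pieterzalis/data-system-project | Backend/info_gathering.py | create_queries
-- ===== SOURCE A (Python) =====
-- def create_queries(keywords):
-- 	queries = []
-- 	for first in range(len(keywords)):
-- 		new_keywords = keywords[first:]
-- 		num_keywords = len(new_keywords)
-- 		for last in range(num_keywords,1,-1):
-- 			query = ''
-- 			for keyword in new_keywords[:last]:
-- 				query += keyword + ' '
-- 				query.strip()
-- 			queries.append(query)
-- 	return queries
-- ===== SOURCE B (Python) =====
-- def create_queries(keywords):
-- 	queries = []
-- 	for first in range(len(keywords)):
-- 		tail = keywords[first:]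
-- 		if len(tail) < 2:
-- 			continue
-- 		acc = tail[0] + ' '
-- 		prefixes = []
-- 		for w in tail[1:]:
-- 			acc += w + ' '
-- 			prefixes.append(acc)
-- 		queries += reversed(prefixes)
-- 	return queries
-- ===== Notes on version B (the rewrite author's own statement) =====
-- stated objective: faster
-- what changed: Instead of rebuilding every query string from scratch in a third nested loop, B extends one running concatenation per start index, records each snapshot, and emits the snapshots in reverse, removing the inner rebuild loop.
import Mathlib
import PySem

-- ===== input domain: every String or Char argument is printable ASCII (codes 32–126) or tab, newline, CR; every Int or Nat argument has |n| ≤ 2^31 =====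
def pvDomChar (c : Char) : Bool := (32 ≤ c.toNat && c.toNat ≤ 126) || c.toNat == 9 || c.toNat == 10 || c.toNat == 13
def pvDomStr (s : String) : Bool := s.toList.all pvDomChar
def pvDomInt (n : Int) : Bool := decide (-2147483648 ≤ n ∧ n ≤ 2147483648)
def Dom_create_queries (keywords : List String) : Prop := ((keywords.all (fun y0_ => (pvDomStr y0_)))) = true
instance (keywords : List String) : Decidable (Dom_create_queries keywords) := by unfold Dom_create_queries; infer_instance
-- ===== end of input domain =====

-- B replaces A's innermost rebuild-the-query-from-scratch loop by one running
-- concatenation per start index whose snapshots are emitted in reverse (objective: faster).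

-- ===== PORT A =====
def create_queries (keywords : List String) : List String :=
  (PySem.List.pyRange 0 (PySem.List.len keywords)).foldl (fun queries first =>
    let new_keywords := PySem.List.slice keywords (some first)
    let num_keywords := PySem.List.len new_keywords
    (PySem.List.pyRange num_keywords 1 (-1)).foldl (fun queries last =>
      queries ++ [(PySem.List.slice new_keywords none (some last)).foldl
        (fun query keyword => query ++ (keyword ++ " ")) ""]) queries) []

-- ===== PORT B =====
def create_queries_alt (keywords : List String) : List String :=
  (PySem.List.pyRange 0 (PySem.List.len keywords)).foldl (fun queries first =>
    let tail := PySem.List.slice keywords (some first)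
    if PySem.List.len tail < 2 then queries else
      queries ++ ((PySem.List.slice tail (some 1)).foldl
        (fun (st : String × List String) w =>
          (st.1 ++ (w ++ " "), st.2 ++ [st.1 ++ (w ++ " ")]))
        (PySem.List.pyGetD tail 0 "" ++ " ", ([] : List String))).2.reverse) []

-- ===== PRECONDITION & SPEC =====
def Spec_create_queries (keywords : List String) (out : List String) : Prop := out = create_queries_alt keywords
instance (keywords : List String) (out : List String) : Decidable (Spec_create_queries keywords out) := by unfold Spec_create_queries; infer_instance

-- ===== CLAIM (what is proved, stated in full; the proofs are below) =====
def Claim_equal_create_queries : Prop := ∀ (keywords : List String), Dom_create_queries keywords → Spec_create_queries keywords (create_queries keywords)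

-- ===== LEMMAS AND PROOFS =====

/-- A's inner query build: concatenation of `w ++ " "` over a word list. -/
def pvPref (ws : List String) : String := ws.foldl (fun q w => q ++ (w ++ " ")) ""

theorem pvPref_shift (l : List String) (a : String) :
    l.foldl (fun q w => q ++ (w ++ " ")) a = a ++ pvPref l := by
  induction l generalizing a with
  | nil => simp only [List.foldl_nil, pvPref]; exact String.append_empty.symm
  | cons w l ih =>
      have hc : pvPref (w :: l) = (w ++ " ") ++ pvPref l := by
        show List.foldl _ "" (w :: l) = _
        rw [List.foldl_cons, ih, String.empty_append]
      rw [List.foldl_cons, ih, hc, String.append_assoc]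

theorem pvPref_cons (w : String) (l : List String) :
    pvPref (w :: l) = (w ++ " ") ++ pvPref l := by
  show List.foldl _ ("" ++ (w ++ " ")) l = _
  rw [pvPref_shift, String.empty_append]

/-- The snapshot list accumulated by B's inner loop. -/
theorem pvSnap (ws : List String) (a : String) (ps : List String) :
    (ws.foldl (fun (st : String × List String) w =>
        (st.1 ++ (w ++ " "), st.2 ++ [st.1 ++ (w ++ " ")])) (a, ps)).2
      = ps ++ (List.range ws.length).map (fun k => a ++ pvPref (ws.take (k+1))) := by
  induction ws generalizing a ps with
  | nil => simp
  | cons w ws ih =>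
      simp only [List.foldl_cons, ih, List.length_cons, List.range_succ_eq_map,
        List.map_cons, List.map_map]
      simp only [List.append_assoc]
      congr 1
      · simp [pvPref]
        intro k _
        rw [pvPref_shift (List.take (k + 1) ws) (w ++ " ")]
        exact String.append_assoc

/-- Per start index, A's descending-last rebuild loop equals B's snapshot loop. -/
theorem pvInner (nk : List String) (qs : List String) :
    (PySem.List.pyRange (PySem.List.len nk) 1 (-1)).foldl
      (fun qs last => qs ++ [(PySem.List.slice nk none (some last)).foldl
        (fun query keyword => query ++ (keyword ++ " ")) ""]) qs
    = (if PySem.List.len nk < 2 then qs else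
        qs ++ ((PySem.List.slice nk (some 1)).foldl
          (fun (st : String × List String) w =>
            (st.1 ++ (w ++ " "), st.2 ++ [st.1 ++ (w ++ " ")]))
          (PySem.List.pyGetD nk 0 "" ++ " ", ([] : List String))).2.reverse) := by
  match nk with
  | [] => simp [PySem.List.len, PySem.List.pyRange_neg_one_eq_nil (by norm_num : (0:ℤ) ≤ 1)]
  | [x] => simp [PySem.List.len, PySem.List.pyRange_neg_one_eq_nil (by norm_num : (1:ℤ) ≤ 1)]
  | h :: h2 :: t =>
      have hm : PySem.List.len (h :: h2 :: t) = ((t.length + 2 : ℕ) : ℤ) := by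
        simp [PySem.List.len]; omega
      rw [PySem.List.foldl_append_singleton_eq_map, hm]
      rw [PySem.List.pyRange_neg_one_eq_reverse, List.map_reverse]
      rw [PySem.List.pyRange_one]
      simp only [show (1:ℤ)+1 = 2 from by norm_num]
      have hslice1 : PySem.List.slice (h :: h2 :: t) (some 1) = h2 :: t := by
        rw [PySem.List.slice_from _ (by norm_num : (0:ℤ) ≤ 1)]; rfl
      have hget : PySem.List.pyGetD (h :: h2 :: t) 0 "" = h := by
        rw [PySem.List.pyGetD_of_nonneg _ _ le_rfl]; rfl
      rw [if_neg (by push_cast; omega)]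
      rw [hslice1, hget, pvSnap]
      congr 1
      congr 1
      have hcnt : ((((t.length + 2 : ℕ) : ℤ) + 1 - 2)).toNat = t.length + 1 := by omega
      rw [hcnt, List.map_map]
      simp only [List.length_cons, List.nil_append]
      apply List.map_congr_left
      intro k hk
      have h2k : (0:ℤ) ≤ 2 + (k : ℤ) := by omega
      rw [Function.comp_apply, PySem.List.slice_to _ h2k]
      have : ((2 + (k:ℤ)).toNat) = k + 2 := by omega
      rw [this]
      show pvPref ((h :: h2 :: t).take (k + 2)) = (h ++ " ") ++ pvPref ((h2 :: t).take (k + 1))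
      rw [show (h :: h2 :: t).take (k + 2) = h :: (h2 :: t).take (k + 1) from rfl, pvPref_cons]

-- ===== VERDICT (by name: the statement is the Claim_ definition above) =====
theorem create_queries_spec : Claim_equal_create_queries := by
  intro keywords _
  unfold Spec_create_queries create_queries create_queries_alt
  refine PySem.List.foldl_congr_mem _ _ _ _ ?_
  intro qs first _
  exact pvInner (PySem.List.slice keywords (some first)) qs
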